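-- pv_equiv track=rewrite | github.com/axhse/filelineindex | filelineindex/core/filetools.py | convert_file_number
-- ===== SOURCE A (Python) =====
-- RECOMMENDED_OS_FILE_LIMIT: int = 1_000_000_000
--
-- def convert_file_number(
--     number: int, group_size: int = RECOMMENDED_OS_FILE_LIMIT
-- ) -> str:
--     """
--     Convert a file indexing number to a hex string with fixed length, considering file group size.
--
--     :param number: The file indexing number to be converted.
--     :param group_size: The group size.
--     :return: A string representation of the file indexing number.
--     """
--     number_width = 0
--     group_size -= 1
--     while group_size > 0:
--         number_width += 1
--         group_size //= 16
--     return hex(number)[2:].upper().rjust(number_width, "0")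
-- ===== SOURCE B (Python) =====
-- RECOMMENDED_OS_FILE_LIMIT: int = 1_000_000_000
--
-- def convert_file_number(
--     number: int, group_size: int = RECOMMENDED_OS_FILE_LIMIT
-- ) -> str:
--     """Closed-form width: number of hex digits needed for group_size-1."""
--     number_width = (max(group_size - 1, 0).bit_length() + 3) // 4
--     return hex(number)[2:].upper().rjust(number_width, "0")
-- ===== Notes on version B (the rewrite author's own statement) =====
-- stated objective: idiomatic
-- what changed: Replaces the divide-by-16 while loop computing the hex-digit width with a closed-form formula from bit_length: (max(group_size-1,0).bit_length()+3)//4.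
import Mathlib
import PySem

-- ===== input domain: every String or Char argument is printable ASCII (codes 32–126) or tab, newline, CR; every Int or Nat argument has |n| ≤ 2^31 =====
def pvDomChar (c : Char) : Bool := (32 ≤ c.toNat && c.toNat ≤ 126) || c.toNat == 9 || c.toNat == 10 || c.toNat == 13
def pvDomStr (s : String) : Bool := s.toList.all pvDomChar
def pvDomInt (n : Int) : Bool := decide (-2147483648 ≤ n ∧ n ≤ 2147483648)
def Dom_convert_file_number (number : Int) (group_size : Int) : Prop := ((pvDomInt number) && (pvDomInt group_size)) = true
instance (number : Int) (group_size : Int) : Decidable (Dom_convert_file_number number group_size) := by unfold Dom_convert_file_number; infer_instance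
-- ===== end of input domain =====

-- B replaces A's divide-by-16 width loop with a closed form from bit_length; the final
-- formatting line hex(number)[2:].upper().rjust(w,"0") is the same in both Pythons, rendered
-- stage by stage in A's port and as a fused uppercase-digit accumulator in B's port.

-- ===== PORT A =====
-- hex(number): lowercase digit characters, most-significant first (recursion with ++)
def pvHexDigitA (n : Nat) : Char :=
  if n < 10 then Char.ofNat (48 + n) else Char.ofNat (87 + n)

def pvHexCharsA (n : Nat) : List Char :=
  if _h : n < 16 then [pvHexDigitA n]
  else pvHexCharsA (n / 16) ++ [pvHexDigitA (n % 16)]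
decreasing_by exact Nat.div_lt_self (by omega) (by omega)

-- hex(number)[2:] : for negative numbers hex gives '-0x…', so [2:] keeps the 'x'
def pvHexTailA (number : Int) : List Char :=
  if number < 0 then 'x' :: pvHexCharsA (-number).toNat else pvHexCharsA number.toNat

-- the while loop of A: counts divide-by-16 steps of group_size - 1
def pvWidthLoopA (g : Int) : Nat :=
  if 0 < g then pvWidthLoopA (PySem.Int.floordiv g 16) + 1 else 0
termination_by g.toNat
decreasing_by
  rename_i h
  rw [PySem.Int.floordiv_eq_ediv_of_pos (by omega : (0:Int) < 16)]
  omega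

def convert_file_number (number : Int) (group_size : Int) : String :=
  let number_width := pvWidthLoopA (group_size - 1)
  let cs := PySem.Chars.upper (pvHexTailA number)
  String.ofList (List.replicate (number_width - cs.length) '0' ++ cs)

-- ===== PORT B =====
-- hex(number)[2:].upper() fused: uppercase digits, collected least-significant first
-- by a tail accumulator, then the '-0x' quirk for negatives ('x' uppercased to 'X').
def pvHexDigitB (n : Nat) : Char :=
  if n < 10 then Char.ofNat (48 + n) else Char.ofNat (55 + n)

def pvHexAccB (n : Nat) (acc : List Char) : List Char :=
  if _h : n = 0 then acc
  else pvHexAccB (n / 16) (pvHexDigitB (n % 16) :: acc)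
decreasing_by exact Nat.div_lt_self (by omega) (by omega)

def pvHexUpperB (n : Nat) : List Char :=
  if n = 0 then ['0'] else pvHexAccB n []

def pvHexTailB (number : Int) : List Char :=
  if number < 0 then 'X' :: pvHexUpperB (-number).toNat else pvHexUpperB number.toNat

-- .rjust(w, "0"): pad only when too short
def pvRjustB (cs : List Char) (w : Nat) : String :=
  if w ≤ cs.length then String.ofList cs
  else String.ofList (List.replicate (w - cs.length) '0' ++ cs)

def convert_file_number_alt (number : Int) (group_size : Int) : String :=
  pvRjustB (pvHexTailB number) ((PySem.Int.bitLength (max (group_size - 1) 0) + 3) / 4)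

-- ===== PRECONDITION & SPEC =====
def Spec_convert_file_number (number : Int) (group_size : Int) (out : String) : Prop := out = convert_file_number_alt number group_size
instance (number : Int) (group_size : Int) (out : String) : Decidable (Spec_convert_file_number number group_size out) := by unfold Spec_convert_file_number; infer_instance

-- ===== CLAIM (what is proved, stated in full; the proofs are below) =====
def Claim_equal_convert_file_number : Prop := ∀ (number : Int) (group_size : Int), Dom_convert_file_number number group_size → Spec_convert_file_number number group_size (convert_file_number number group_size)

-- ===== LEMMAS AND PROOFS =====

lemma pvWidthLoopA_eq (g : Int) :
    pvWidthLoopA g = if 0 < g then pvWidthLoopA (PySem.Int.floordiv g 16) + 1 else 0 := by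
  rw [pvWidthLoopA]

lemma pvWidthLoopA_nat (n : Nat) :
    pvWidthLoopA (n : Int) = (PySem.Int.bitLength (n : Int) + 3) / 4 := by
  induction n using Nat.strong_induction_on with
  | _ n ih =>
    rw [pvWidthLoopA_eq]
    by_cases h0 : 0 < n
    · have hcast : PySem.Int.floordiv (n : Int) 16 = ((n / 16 : Nat) : Int) := by
        exact_mod_cast PySem.Int.floordiv_natCast n 16
      rw [if_pos (by exact_mod_cast h0), hcast, ih (n / 16) (Nat.div_lt_self h0 (by omega))]
      by_cases h16 : 16 ≤ n
      · have h1 := PySem.Int.bitLength_natCast (m := n) h0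
        have h2 := PySem.Int.bitLength_natCast (m := n / 2) (by omega)
        have h3 := PySem.Int.bitLength_natCast (m := n / 2 / 2) (by omega)
        have h4 := PySem.Int.bitLength_natCast (m := n / 2 / 2 / 2) (by omega)
        have hdiv : n / 2 / 2 / 2 / 2 = n / 16 := by omega
        rw [h1, h2, h3, h4, hdiv]
        omega
      · have hz : n / 16 = 0 := by omega
        rw [hz]
        have hb : PySem.Int.bitLength ((0 : Nat) : Int) = 0 := by decide
        have hb2 : PySem.Int.bitLength (n : Int) ≤ 4 ∧ 1 ≤ PySem.Int.bitLength (n : Int) := by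
          interval_cases n <;> exact ⟨by decide, by decide⟩
        rw [hb]
        omega
    · rw [if_neg (by exact_mod_cast h0)]
      have : n = 0 := by omega
      subst this
      decide

lemma pvWidthLoopA_closed (g : Int) :
    pvWidthLoopA g = (PySem.Int.bitLength (max g 0) + 3) / 4 := by
  by_cases h : 0 < g
  · have : (max g 0) = ((g.toNat : Nat) : Int) := by omega
    rw [this, ← pvWidthLoopA_nat]
    congr 1
    omega
  · rw [pvWidthLoopA_eq, if_neg h]
    have : max g 0 = ((0 : Nat) : Int) := by omega
    rw [this]
    decide

lemma pvHexDigit_upper (n : Nat) (h : n < 16) :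
    PySem.Chars.upperChar (pvHexDigitA n) = pvHexDigitB n := by
  interval_cases n <;> decide

lemma pvHexAccB_eq (n : Nat) (acc : List Char) :
    pvHexAccB n acc = pvHexAccB n [] ++ acc := by
  induction n using Nat.strong_induction_on generalizing acc with
  | _ n ih =>
    by_cases h : n = 0
    · have hz : ∀ a : List Char, pvHexAccB 0 a = a := fun a => by rw [pvHexAccB]; simp
      simp [h, hz]
    · conv_lhs => rw [pvHexAccB]
      conv_rhs => rw [pvHexAccB]
      simp only [dif_neg h]
      rw [ih (n / 16) (Nat.div_lt_self (by omega) (by omega)),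
          ih (n / 16) (Nat.div_lt_self (by omega) (by omega)) [pvHexDigitB (n % 16)]]
      simp

lemma pvHexChars_upper (n : Nat) :
    List.map PySem.Chars.upperChar (pvHexCharsA n) = pvHexUpperB n := by
  induction n using Nat.strong_induction_on with
  | _ n ih =>
    rw [pvHexCharsA]
    by_cases h : n < 16
    · rw [dif_pos h]
      by_cases h0 : n = 0
      · subst h0; decide
      · rw [pvHexUpperB, if_neg h0, pvHexAccB, dif_neg h0]
        have hz : n / 16 = 0 := by omega
        rw [hz, pvHexAccB, dif_pos rfl]
        have hm : n % 16 = n := by omega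
        simp [hm, pvHexDigit_upper n h]
    · rw [dif_neg h]
      have hlt : n / 16 < n := Nat.div_lt_self (by omega) (by omega)
      have hne : n ≠ 0 := by omega
      have hd : n / 16 ≠ 0 := by omega
      conv_rhs => rw [pvHexUpperB, if_neg hne, pvHexAccB, dif_neg hne, pvHexAccB_eq]
      rw [List.map_append, ih (n / 16) hlt, pvHexUpperB, if_neg hd]
      simp [pvHexDigit_upper (n % 16) (Nat.mod_lt _ (by omega))]

lemma pvHexTail_upper (number : Int) :
    PySem.Chars.upper (pvHexTailA number) = pvHexTailB number := by
  unfold pvHexTailA pvHexTailB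
  by_cases h : number < 0
  · have hx : PySem.Chars.upperChar 'x' = 'X' := by decide
    simp only [if_pos h, PySem.Chars.upper, List.map_cons, hx, pvHexChars_upper]
  · simp only [if_neg h, PySem.Chars.upper, pvHexChars_upper]

lemma pvRjustB_eq (cs : List Char) (w : Nat) :
    pvRjustB cs w = String.ofList (List.replicate (w - cs.length) '0' ++ cs) := by
  unfold pvRjustB
  by_cases h : w ≤ cs.length
  · rw [if_pos h]
    have : w - cs.length = 0 := by omega
    simp [this]
  · rw [if_neg h]

-- ===== VERDICT (by name: the statement is the Claim_ definition above) =====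
theorem convert_file_number_spec : Claim_equal_convert_file_number := by
  intro number group_size _
  unfold Spec_convert_file_number convert_file_number convert_file_number_alt
  rw [pvRjustB_eq, ← pvHexTail_upper, pvWidthLoopA_closed]
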